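-- pv_equiv track=rewrite | github.com/MtSomeThree/constrDecoding | LCG/bleu.py | triGram
-- ===== SOURCE A (Python) =====
-- def triGramDictionary(sentence):
--     dictionary={}
--     #sentence = sentence[0]
--     i = 0
--     sentence = list(sentence)
--     while i < len(sentence):
--         if i+2 >= len(sentence):
--             break
--         trigram="".join(sentence[i])+" "+"".join(sentence[i+1])+" "+"".join(sentence[i+2])
--         #print "trigram:", trigram
--         if trigram in dictionary:
--             dictionary[trigram]+=1
--         else:
--             dictionary[trigram]=1
--         i += 1
--     return dictionary
--
-- def triGram(candidateSentence,referenceSentences):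
--     referenceDict=[]
--     #candidateSentence=candidateSentence.lower().split()
--     candidateSentence=filter(None,candidateSentence)
--     candidateDict = triGramDictionary(candidateSentence)
--     count=0
--     for line in referenceSentences:
--         #line=line.lower().split()
--         line=filter(None,line)
--         referenceDict.append(triGramDictionary(line))
--     for word in candidateDict:
--         maxRefIndex=0
--         for index2 in range(0,len(referenceDict)):
--             if word in referenceDict[index2]:
--                 maxRefIndex=max(maxRefIndex,referenceDict[index2][word])
--
--         count+=min(candidateDict[word],maxRefIndex)
--     sumngram=0
--     for values in candidateDict.values():
--         sumngram+=values
--     return count,sumngram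
-- ===== SOURCE B (Python) =====
-- def _trigrams(words):
--     ws = [w for w in words if w]
--     return [a + " " + b + " " + c for a, b, c in zip(ws, ws[1:], ws[2:])]
--
-- def triGram(candidateSentence, referenceSentences):
--     merged = {}
--     for ref in referenceSentences:
--         ts = _trigrams(ref)
--         for t in set(ts):
--             c = ts.count(t)
--             if c > merged.get(t, 0):
--                 merged[t] = c
--     budget = dict(merged)
--     count = 0
--     ts = _trigrams(candidateSentence)
--     for t in ts:
--         if budget.get(t, 0) > 0:
--             count += 1
--             budget[t] -= 1
--     return count, len(ts)
-- ===== Notes on version B (the rewrite author's own statement) =====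
-- stated objective: faster
-- what changed: A groups the candidate into a trigram dict and, per unique candidate trigram, scans every reference dict for the max before taking min; B first merges all references into one max-count dict, then streams the raw candidate trigram sequence once, consuming that dict as a budget (count+1 and decrement while the budget is positive), returning (count, number of trigrams).
import Mathlib
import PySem

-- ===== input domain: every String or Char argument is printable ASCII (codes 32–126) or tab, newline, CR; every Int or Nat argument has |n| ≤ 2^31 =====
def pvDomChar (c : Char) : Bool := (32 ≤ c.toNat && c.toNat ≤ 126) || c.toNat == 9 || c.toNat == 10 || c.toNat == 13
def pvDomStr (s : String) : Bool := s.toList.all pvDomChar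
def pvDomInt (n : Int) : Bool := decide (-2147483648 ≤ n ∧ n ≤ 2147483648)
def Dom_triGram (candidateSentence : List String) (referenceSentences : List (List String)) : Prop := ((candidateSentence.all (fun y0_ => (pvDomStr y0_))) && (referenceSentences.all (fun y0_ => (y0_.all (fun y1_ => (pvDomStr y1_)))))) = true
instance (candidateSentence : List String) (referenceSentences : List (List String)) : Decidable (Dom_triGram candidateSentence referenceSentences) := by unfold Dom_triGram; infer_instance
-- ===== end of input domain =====

-- B replaces A's candidate-dict grouping + per-key scan of all reference dicts by one merged
-- max-count reference dict consumed as a budget while streaming the raw candidate trigrams (alternative decomposition).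

-- ===== PORT A =====
-- while loop of triGramDictionary: index recursion, break when i+2 >= len
def tgdGo (s : List String) (i : Nat) (d : PySem.Dict String Int) : PySem.Dict String Int :=
  if i < s.length then
    if s.length ≤ i + 2 then d
    else
      tgdGo s (i+1)
        (d.insert (s.getD i "" ++ " " ++ s.getD (i+1) "" ++ " " ++ s.getD (i+2) "")
          (d.getD (s.getD i "" ++ " " ++ s.getD (i+1) "" ++ " " ++ s.getD (i+2) "") 0 + 1))
  else d
termination_by s.length - i

def triGramDictionary (sentence : List String) : PySem.Dict String Int :=
  tgdGo sentence 0 PySem.Dict.empty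

def triGram (candidateSentence : List String) (referenceSentences : List (List String)) : Int × Int :=
  let cand := candidateSentence.filter (fun w => w ≠ "")
  let candidateDict := triGramDictionary cand
  let referenceDict := referenceSentences.foldl
    (fun acc line => acc ++ [triGramDictionary (line.filter (fun w => w ≠ ""))]) []
  let count := candidateDict.keys.foldl
    (fun count word =>
      let maxRefIndex := (PySem.List.pyRange 0 (referenceDict.length : Int) 1).foldl
        (fun m j =>
          let rd := PySem.List.pyGetD referenceDict j PySem.Dict.empty
          if rd.contains word then max m (rd.getD word 0) else m) 0
      count + min (candidateDict.getD word 0) maxRefIndex) 0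
  let sumngram := candidateDict.values.foldl (fun s v => s + v) 0
  (count, sumngram)

-- ===== PORT B =====
def triGramsB (words : List String) : List String :=
  let ws := words.filter (fun w => w ≠ "")
  ((ws.zip (ws.drop 1)).zip (ws.drop 2)).map (fun p => p.1.1 ++ " " ++ p.1.2 ++ " " ++ p.2)

def triGram_alt (candidateSentence : List String) (referenceSentences : List (List String)) : Int × Int :=
  let merged := referenceSentences.foldl
    (fun m ref =>
      let ts := triGramsB ref
      (PySem.Set.ofList ts).foldl
        (fun m t => if (ts.count t : Int) > m.getD t 0 then m.insert t (ts.count t : Int) else m) m)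
    PySem.Dict.empty
  let ts := triGramsB candidateSentence
  let res := ts.foldl
    (fun (p : Int × PySem.Dict String Int) t =>
      if p.2.getD t 0 > 0 then (p.1 + 1, p.2.insert t (p.2.getD t 0 - 1)) else p)
    (0, merged)
  (res.1, (ts.length : Int))

-- ===== PRECONDITION & SPEC =====
def Spec_triGram (candidateSentence : List String) (referenceSentences : List (List String)) (out : Int × Int) : Prop := out = triGram_alt candidateSentence referenceSentences
instance (candidateSentence : List String) (referenceSentences : List (List String)) (out : Int × Int) : Decidable (Spec_triGram candidateSentence referenceSentences out) := by unfold Spec_triGram; infer_instance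

-- ===== CLAIM (what is proved, stated in full; the proofs are below) =====
def Claim_equal_triGram : Prop := ∀ (candidateSentence : List String) (referenceSentences : List (List String)), Dom_triGram candidateSentence referenceSentences → Spec_triGram candidateSentence referenceSentences (triGram candidateSentence referenceSentences)

-- ===== LEMMAS AND PROOFS =====

-- trigram list of a (already filtered) word list
def triZ (ws : List String) : List String :=
  ((ws.zip (ws.drop 1)).zip (ws.drop 2)).map (fun p => p.1.1 ++ " " ++ p.1.2 ++ " " ++ p.2)

lemma triGramsB_eq (ws : List String) : triGramsB ws = triZ (ws.filter (fun w => w ≠ "")) := rfl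

lemma triZ_short {ws : List String} (h : ws.length ≤ 2) : triZ ws = [] := by
  have : ws.drop 2 = [] := List.drop_eq_nil_iff.mpr h
  simp [triZ, this]

lemma triZ_cons (a b c : String) (rest : List String) :
    triZ (a :: b :: c :: rest) = (a ++ " " ++ b ++ " " ++ c) :: triZ (b :: c :: rest) := by
  simp [triZ]

lemma tgdGo_eq_foldl : ∀ (n : Nat) (s : List String) (i : Nat) (d : PySem.Dict String Int),
    s.length ≤ i + n →
    tgdGo s i d = (triZ (s.drop i)).foldl (fun d t => d.insert t (d.getD t 0 + 1)) d := by
  intro n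
  induction n with
  | zero =>
    intro s i d h
    rw [tgdGo]
    have hnil : s.drop i = [] := List.drop_eq_nil_iff.mpr (by omega)
    simp [hnil, triZ, if_neg (by omega : ¬ i < s.length)]
  | succ n ih =>
    intro s i d h
    rw [tgdGo]
    by_cases h1 : i < s.length
    · by_cases h2 : s.length ≤ i + 2
      · have : (s.drop i).length ≤ 2 := by simp [List.length_drop]; omega
        simp [if_pos h2, triZ_short this]
      · have hi1 : i + 1 < s.length := by omega
        have hi2 : i + 2 < s.length := by omega
        have e : s.drop i = s[i] :: s[i+1] :: s[i+2] :: s.drop (i+3) := by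
          rw [List.drop_eq_getElem_cons h1, List.drop_eq_getElem_cons hi1,
            List.drop_eq_getElem_cons hi2]
        have e1 : s.drop (i+1) = s[i+1] :: s[i+2] :: s.drop (i+3) := by
          rw [List.drop_eq_getElem_cons hi1, List.drop_eq_getElem_cons hi2]
        rw [if_pos h1, if_neg h2, ih s (i+1) _ (by omega), e, e1, triZ_cons,
          List.getD_eq_getElem s "" h1, List.getD_eq_getElem s "" hi1,
          List.getD_eq_getElem s "" hi2, List.foldl_cons]
    · have hnil : s.drop i = [] := List.drop_eq_nil_iff.mpr (by omega)
      simp [hnil, triZ, if_neg h1]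

lemma tgd_counter (s : List String) :
    triGramDictionary s = PySem.Dict.counter (triZ s) := by
  rw [triGramDictionary, tgdGo_eq_foldl s.length s 0 _ (by omega), List.drop_zero,
    PySem.Dict.foldl_insert_getD_add_one_eq_counter]

lemma foldl_append_map {α β : Type} (l : List α) (f : α → β) (acc : List β) :
    l.foldl (fun acc x => acc ++ [f x]) acc = acc ++ l.map f := by
  induction l generalizing acc with
  | nil => simp
  | cons x l ih => simp [ih]

lemma foldl_add_eq_sum {α : Type} (l : List α) (f : α → Int) (k : Int) :
    l.foldl (fun c w => c + f w) k = k + (l.map f).sum := by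
  induction l generalizing k with
  | nil => simp
  | cons x l ih => simp [ih]; ring

lemma toFinset_ofList (xs : List String) : (PySem.Set.ofList xs).toFinset = xs.toFinset := by
  ext y; simp [List.mem_toFinset, PySem.Set.mem_ofList]

lemma foldl_keys_counter_sum (T : List String) (f : String → Int) :
    (PySem.Dict.counter T).keys.foldl (fun c w => c + f w) 0 = ∑ w ∈ T.toFinset, f w := by
  rw [PySem.Dict.keys_counter, foldl_add_eq_sum, zero_add,
    ← List.sum_toFinset f (PySem.Set.nodup_ofList T), toFinset_ofList]

-- the max reference count of w, over a list of trigram lists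
def mx (tss : List (List String)) (w : String) : Int :=
  tss.foldl (fun a ts => if w ∈ ts then max a ((ts.count w : Int)) else a) 0

lemma mx_fold_nonneg (tss : List (List String)) (w : String) :
    ∀ a : Int, 0 ≤ a →
      0 ≤ tss.foldl (fun a ts => if w ∈ ts then max a ((ts.count w : Int)) else a) a := by
  induction tss with
  | nil => intro a ha; simpa using ha
  | cons ts tss ih =>
    intro a ha
    simp only [List.foldl_cons]
    apply ih
    split
    · exact le_trans ha (le_max_left _ _)
    · exact ha

lemma mx_nonneg (tss : List (List String)) (w : String) : 0 ≤ mx tss w :=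
  mx_fold_nonneg tss w 0 le_rfl

-- A's inner per-word scan over the reference counter dicts computes mx
lemma scan_eq_mx (tss : List (List String)) (w : String) :
    (tss.map (fun ts => PySem.Dict.counter ts)).foldl
      (fun m rd => if rd.contains w then max m (rd.getD w 0) else m) 0 = mx tss w := by
  rw [List.foldl_map, mx]
  congr 1
  funext a ts
  simp [PySem.Dict.contains_counter, PySem.Dict.getD_counter]

lemma merge_inner_getD (ts : List String) (w : String) :
    ∀ (S : List String) (m : PySem.Dict String Int),
      ((S.foldl
        (fun m t => if (ts.count t : Int) > m.getD t 0 then m.insert t (ts.count t : Int) else m)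
        m).getD w 0)
      = if w ∈ S then max (m.getD w 0) ((ts.count w : Int)) else m.getD w 0 := by
  intro S
  induction S with
  | nil => intro m; simp
  | cons t S ih =>
    intro m
    simp only [List.foldl_cons]
    rw [ih]
    rcases eq_or_ne w t with h | h
    · subst h
      by_cases hc : (ts.count w : Int) > m.getD w 0
      · rw [if_pos hc]
        simp only [PySem.Dict.getD_insert, List.mem_cons, true_or, if_true]
        split_ifs <;> omega
      · rw [if_neg hc]
        simp only [List.mem_cons, true_or, if_true]
        split_ifs <;> omega
    · have hstep : ((if (ts.count t : Int) > m.getD t 0 then m.insert t (ts.count t : Int) else m).getD w 0)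
          = m.getD w 0 := by
        split_ifs with h1
        · rw [PySem.Dict.getD_insert, if_neg h]
        · rfl
      rw [hstep]
      simp [List.mem_cons, h]

lemma merged_getD_fold (w : String) :
    ∀ (tss : List (List String)) (m : PySem.Dict String Int),
      (tss.foldl
        (fun m ts =>
          (PySem.Set.ofList ts).foldl
            (fun m t => if (ts.count t : Int) > m.getD t 0 then m.insert t (ts.count t : Int) else m) m)
        m).getD w 0
      = tss.foldl (fun a ts => if w ∈ ts then max a ((ts.count w : Int)) else a) (m.getD w 0) := by
  intro tss
  induction tss with
  | nil => intro m; rfl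
  | cons ts tss ih =>
    intro m
    simp only [List.foldl_cons]
    rw [ih]
    congr 1
    rw [merge_inner_getD]
    simp [PySem.Set.mem_ofList]

-- B's merged dict lookup computes mx
lemma merged_getD (tss : List (List String)) (w : String) :
    (tss.foldl
      (fun m ts =>
        (PySem.Set.ofList ts).foldl
          (fun m t => if (ts.count t : Int) > m.getD t 0 then m.insert t (ts.count t : Int) else m) m)
      PySem.Dict.empty).getD w 0 = mx tss w := by
  rw [merged_getD_fold, mx]
  congr 1

-- B's streaming consumption equals the clipped-count sum
lemma consume_eq (ts : List String) (d : PySem.Dict String Int) (k : Int)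
    (hd : ∀ w, 0 ≤ d.getD w 0) :
    (ts.foldl
      (fun (p : Int × PySem.Dict String Int) t =>
        if p.2.getD t 0 > 0 then (p.1 + 1, p.2.insert t (p.2.getD t 0 - 1)) else p) (k, d)).1
    = k + ∑ w ∈ ts.toFinset, min ((ts.count w : Int)) (d.getD w 0) := by
  induction ts generalizing d k with
  | nil => simp
  | cons t ts ih =>
    simp only [List.foldl_cons]
    have hsplitR :
        ∑ w ∈ (t :: ts).toFinset, min (((t :: ts).count w : Int)) (d.getD w 0)
          = min (((t :: ts).count t : Int)) (d.getD t 0)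
            + ∑ w ∈ ts.toFinset.erase t, min (((t :: ts).count w : Int)) (d.getD w 0) := by
      rw [List.toFinset_cons,
        ← Finset.add_sum_erase _ _ (Finset.mem_insert_self t ts.toFinset),
        Finset.erase_insert_eq_erase]
    have hcountt : ((t :: ts).count t : Int) = (ts.count t : Int) + 1 := by
      rw [List.count_cons_self]; push_cast; ring
    have hcong : ∀ d' : Int,
        ∑ w ∈ ts.toFinset.erase t, min ((ts.count w : Int)) ((d.insert t d').getD w 0)
          = ∑ w ∈ ts.toFinset.erase t, min (((t :: ts).count w : Int)) (d.getD w 0) := by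
      intro d'
      refine Finset.sum_congr rfl ?_
      intro w hw
      have hne : w ≠ t := (Finset.mem_erase.mp hw).1
      rw [PySem.Dict.getD_insert, if_neg hne, List.count_cons, if_neg (by simpa using Ne.symm hne),
        Nat.add_zero]
    have hsplitL : ∀ e : PySem.Dict String Int, (∀ w, 0 ≤ e.getD w 0) →
        ∑ w ∈ ts.toFinset, min ((ts.count w : Int)) (e.getD w 0)
          = min ((ts.count t : Int)) (e.getD t 0)
            + ∑ w ∈ ts.toFinset.erase t, min ((ts.count w : Int)) (e.getD w 0) := by
      intro e he
      by_cases ht : t ∈ ts.toFinset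
      · exact (Finset.add_sum_erase _ _ ht).symm
      · rw [Finset.erase_eq_of_notMem ht]
        have hc0 : ts.count t = 0 :=
          List.count_eq_zero.mpr (fun hmem => ht (List.mem_toFinset.mpr hmem))
        have := he t
        rw [hc0]
        have : min ((0 : Nat) : Int) (e.getD t 0) = 0 := by
          have := he t; omega
        rw [this, zero_add]
    by_cases hc : d.getD t 0 > 0
    · rw [if_pos hc]
      have hd' : ∀ w, 0 ≤ (d.insert t (d.getD t 0 - 1)).getD w 0 := by
        intro w
        rw [PySem.Dict.getD_insert]
        split_ifs
        · have := hd t; omega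
        · exact hd w
      rw [ih _ _ hd', hsplitR, hsplitL _ hd', hcong, hcountt,
        PySem.Dict.getD_insert, if_pos rfl]
      have := hd t
      omega
    · rw [if_neg hc]
      rw [ih _ _ hd, hsplitR, hsplitL _ hd, hcountt]
      have h0 : d.getD t 0 = 0 := by have := hd t; omega
      have hcongr2 : ∑ w ∈ ts.toFinset.erase t, min ((ts.count w : Int)) (d.getD w 0)
          = ∑ w ∈ ts.toFinset.erase t, min (((t :: ts).count w : Int)) (d.getD w 0) := by
        refine Finset.sum_congr rfl ?_
        intro w hw
        have hne : w ≠ t := (Finset.mem_erase.mp hw).1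
        rw [List.count_cons, if_neg (by simpa using Ne.symm hne), Nat.add_zero]
      rw [hcongr2]
      omega

lemma values_counter_sum (T : List String) :
    (PySem.Dict.counter T).values.foldl (fun s v => s + v) 0 = (T.length : Int) := by
  have h := foldl_add_eq_sum ((PySem.Set.ofList T).map (fun k => (T.count k : Int))) (fun v => v) 0
  simp only [PySem.Dict.values, PySem.Dict.items_counter, List.map_map, Function.comp_def]
  rw [h, zero_add, List.map_id', ← List.sum_toFinset _ (PySem.Set.nodup_ofList T),
    toFinset_ofList, ← Nat.cast_sum, List.sum_toFinset_count_eq_length]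

-- merged_getD specialised to the shape appearing in triGram_alt
lemma merged_getD' (refs : List (List String)) (w : String) :
    (refs.foldl
      (fun m ref =>
        (PySem.Set.ofList (triZ (ref.filter (fun w => w ≠ "")))).foldl
          (fun m t =>
            if ((triZ (ref.filter (fun w => w ≠ ""))).count t : Int) > m.getD t 0
            then m.insert t ((triZ (ref.filter (fun w => w ≠ ""))).count t : Int) else m) m)
      PySem.Dict.empty).getD w 0
    = mx (refs.map (fun r => triZ (r.filter (fun w => w ≠ "")))) w := by
  have h := merged_getD (refs.map (fun r => triZ (r.filter (fun w => w ≠ "")))) w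
  rw [List.foldl_map] at h
  exact h

-- ===== VERDICT (by name: the statement is the Claim_ definition above) =====
theorem triGram_spec : Claim_equal_triGram := by
  intro c refs _
  unfold Spec_triGram triGram triGram_alt
  simp only [tgd_counter, triGramsB_eq, foldl_append_map, List.nil_append, Prod.mk.injEq]
  constructor
  · rw [consume_eq _ _ _ (fun w => merged_getD' refs w ▸ mx_nonneg _ _), zero_add,
      foldl_keys_counter_sum]
    refine Finset.sum_congr rfl ?_
    intro w _hw
    rw [PySem.Dict.getD_counter, merged_getD' refs w]
    congr 1
    rw [PySem.List.foldl_pyRange_zero_pyGetD' _ PySem.Dict.empty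
        (fun m (rd : PySem.Dict String Int) => if rd.contains w then max m (rd.getD w 0) else m) 0,
      ]
    have h2 := scan_eq_mx (refs.map (fun r => triZ (r.filter (fun w => w ≠ "")))) w
    simp only [List.map_map, Function.comp_def] at h2
    exact h2
  · exact values_counter_sum _
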